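-- pv_equiv track=rewrite | github.com/Ziga12341/AOC-2024 | Day 03/main.py | parse_enabled
-- ===== SOURCE A (Python) =====
-- def parse_enabled(text: str) -> list[str]:
--     split_dont = text.split("don't()")
--     first_valid = split_dont[0]
--     other_candidates_in_list = split_dont[1:]
--     collect_do_candidates = [first_valid]
--     for candidate in other_candidates_in_list:
--         collect_do_candidates.extend(candidate.split("do()")[1:])
--     return collect_do_candidates
-- ===== SOURCE B (Python) =====
-- def parse_enabled(text: str) -> list[str]:
--     # Single left-to-right scan with a 3-state machine (prefix / off / on)
--     # instead of split-on-don't-then-split-on-do nested passes.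
--     out = []
--     cur = []  # characters of the segment being collected
--     mode = 0  # 0 = prefix (before any don't()), 1 = disabled, 2 = enabled after a do()
--     i = 0
--     n = len(text)
--     while i < n:
--         if text.startswith("don't()", i):
--             if mode != 1:
--                 out.append(''.join(cur))
--                 cur = []
--             mode = 1
--             i += 7
--         elif mode != 0 and text.startswith("do()", i):
--             if mode == 2:
--                 out.append(''.join(cur))
--             cur = []
--             mode = 2
--             i += 4
--         else:
--             if mode != 1:
--                 cur.append(text[i])
--             i += 1
--     if mode != 1:
--         out.append(''.join(cur))
--     return out
-- ===== Notes on version B (the rewrite author's own statement) =====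
-- stated objective: alternative
-- what changed: B replaces A's nested split-on-"don't()"-then-split-on-"do()" passes (which build intermediate chunk lists) by a single left-to-right index scan with a three-state machine (prefix/disabled/enabled) that emits segments directly.
import Mathlib
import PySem

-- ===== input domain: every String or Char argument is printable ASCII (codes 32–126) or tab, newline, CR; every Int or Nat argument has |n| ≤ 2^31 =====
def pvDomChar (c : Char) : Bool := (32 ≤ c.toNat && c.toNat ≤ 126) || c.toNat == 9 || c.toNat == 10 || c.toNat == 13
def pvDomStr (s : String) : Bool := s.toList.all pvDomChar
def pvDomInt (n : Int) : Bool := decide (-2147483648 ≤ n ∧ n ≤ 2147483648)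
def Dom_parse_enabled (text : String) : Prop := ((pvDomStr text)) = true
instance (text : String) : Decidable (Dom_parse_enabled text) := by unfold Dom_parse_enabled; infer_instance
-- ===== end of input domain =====

-- B replaces A's nested split-on-"don't()"-then-split-on-"do()" passes by a single
-- left-to-right scan with a 3-state machine (objective: alternative decomposition, same cost).

-- ===== PORT A =====
-- Python: text.split("don't()") / candidate.split("do()") — separators are nonempty
-- literals, so Chars.splitOn is exact; split_dont[0] is safe (split never returns []).
def parse_enabled (text : String) : List String :=
  let split_dont := (PySem.Chars.splitOn text.toList "don't()".toList).map String.ofList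
  let first_valid := split_dont.headD ""        -- split_dont[0]; split never returns []
  let other_candidates_in_list := PySem.List.slice split_dont (some 1) none
  other_candidates_in_list.foldl
    (fun acc candidate =>
      acc ++ PySem.List.slice ((PySem.Chars.splitOn candidate.toList "do()".toList).map String.ofList) (some 1) none)
    [first_valid]

-- ===== PORT B =====
-- B's index scan 'while i < n: text.startswith(marker, i)' is ported as the same scan by
-- suffix recursion (startswith(m, i) = m.isPrefixOf (suffix), i += k = drop k), exact.
-- mode: 0 = prefix (before any "don't()"), 1 = disabled, 2 = enabled after a "do()".
def pvParseGo : List Char → Nat → List Char → List (List Char) → List (List Char)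
  | [], mode, cur, out => if mode == 1 then out else out ++ [cur]
  | s@(c :: rest), mode, cur, out =>
    if List.isPrefixOf "don't()".toList s then
      pvParseGo (s.drop 7) 1 [] (if mode == 1 then out else out ++ [cur])
    else if mode != 0 && List.isPrefixOf "do()".toList s then
      pvParseGo (s.drop 4) 2 [] (if mode == 2 then out ++ [cur] else out)
    else
      pvParseGo rest mode (if mode == 1 then cur else cur ++ [c]) out
  termination_by s => s.length
  decreasing_by all_goals (simp_all; try omega)

def parse_enabled_alt (text : String) : List String :=
  (pvParseGo text.toList 0 [] []).map String.ofList

-- ===== PRECONDITION & SPEC =====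
def Spec_parse_enabled (text : String) (out : List String) : Prop := out = parse_enabled_alt text
instance (text : String) (out : List String) : Decidable (Spec_parse_enabled text out) := by unfold Spec_parse_enabled; infer_instance

-- ===== CLAIM (what is proved, stated in full; the proofs are below) =====
def Claim_equal_parse_enabled : Prop := ∀ (text : String), Dom_parse_enabled text → Spec_parse_enabled text (parse_enabled text)

-- ===== LEMMAS AND PROOFS =====

-- A-side semantic shapes (proof helpers only)
def pvG (c : List Char) : List (List Char) := (PySem.Chars.splitOn c "do()".toList).drop 1
def pvTailF (s : List Char) : List (List Char) := ((PySem.Chars.splitOn s "don't()".toList).drop 1).flatMap pvG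
def pvResA (s : List Char) : List (List Char) := (PySem.Chars.splitOn s "don't()".toList).headD [] :: pvTailF s
def pvOffA (s : List Char) : List (List Char) := (PySem.Chars.splitOn s "don't()".toList).flatMap pvG
def pvOnA (s : List Char) : List (List Char) :=
  PySem.Chars.splitOn ((PySem.Chars.splitOn s "don't()".toList).headD []) "do()".toList ++ pvTailF s

-- splitOn.go: one-step unfolding equations
theorem pvGoNil (sep : List Char) (f : Nat) (cur : List Char) (acc : List (List Char)) :
    PySem.Chars.splitOn.go sep (f+1) [] cur acc = (cur.reverse :: acc).reverse := by
  rw [PySem.Chars.splitOn.go]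
  omega

theorem pvGoPref (sep : List Char) (f : Nat) (c : Char) (rest cur : List Char) (acc : List (List Char))
    (h : sep.isPrefixOf (c :: rest) = true) :
    PySem.Chars.splitOn.go sep (f+1) (c :: rest) cur acc
      = PySem.Chars.splitOn.go sep f ((c :: rest).drop sep.length) [] (cur.reverse :: acc) := by
  rw [PySem.Chars.splitOn.go]
  simp [h]

theorem pvGoChar (sep : List Char) (f : Nat) (c : Char) (rest cur : List Char) (acc : List (List Char))
    (h : sep.isPrefixOf (c :: rest) = false) :
    PySem.Chars.splitOn.go sep (f+1) (c :: rest) cur acc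
      = PySem.Chars.splitOn.go sep f rest (c :: cur) acc := by
  rw [PySem.Chars.splitOn.go]
  simp [h]

theorem pvSplitOnDef (l sep : List Char) :
    PySem.Chars.splitOn l sep = PySem.Chars.splitOn.go sep (l.length + 1) l [] [] := rfl

theorem pvSplitNil (sep : List Char) : PySem.Chars.splitOn [] sep = [[]] := rfl

-- splitOn.go, fuel-free characterisation
theorem pvGoEq (sep : List Char) (hsep : sep ≠ []) :
    ∀ (n : Nat) (l : List Char), l.length ≤ n → ∀ (fuel : Nat) (cur : List Char) (acc : List (List Char)),
      l.length + 1 ≤ fuel →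
      PySem.Chars.splitOn.go sep fuel l cur acc
        = acc.reverse ++ (PySem.Chars.splitOn l sep).modifyHead (fun x => cur.reverse ++ x) := by
  intro n
  induction n with
  | zero =>
    intro l hl fuel cur acc hf
    obtain rfl : l = [] := List.length_eq_zero_iff.mp (by omega)
    obtain ⟨f, rfl⟩ : ∃ f, fuel = f + 1 := ⟨fuel - 1, by omega⟩
    rw [pvGoNil, pvSplitNil]
    simp
  | succ n ih =>
    intro l hl fuel cur acc hf
    match l with
    | [] =>
      obtain ⟨f, rfl⟩ : ∃ f, fuel = f + 1 := ⟨fuel - 1, by omega⟩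
      rw [pvGoNil, pvSplitNil]
      simp
    | c :: rest =>
      obtain ⟨f, rfl⟩ : ∃ f, fuel = f + 1 := ⟨fuel - 1, by omega⟩
      have hkpos : 0 < sep.length := List.length_pos_iff.mpr hsep
      by_cases hp : sep.isPrefixOf (c :: rest) = true
      · have hdl : ((c :: rest).drop sep.length).length ≤ n := by
          simp only [List.length_drop, List.length_cons] at *; omega
        rw [pvGoPref _ _ _ _ _ _ hp]
        rw [ih _ hdl f [] _ (by simp only [List.length_drop, List.length_cons] at *; omega)]
        have hsplit : PySem.Chars.splitOn (c :: rest) sep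
            = [] :: PySem.Chars.splitOn ((c :: rest).drop sep.length) sep := by
          rw [pvSplitOnDef (c :: rest), List.length_cons, pvGoPref _ _ _ _ _ _ hp]
          rw [ih _ hdl _ [] _ (by simp only [List.length_drop, List.length_cons] at *; omega)]
          simp
          generalize PySem.Chars.splitOn (List.drop sep.length (c :: rest)) sep = t
          cases t <;> simp
        rw [hsplit]
        simp
        generalize PySem.Chars.splitOn (List.drop sep.length (c :: rest)) sep = t
        cases t <;> simp
      · replace hp : sep.isPrefixOf (c :: rest) = false := Bool.not_eq_true _ ▸ eq_false_of_ne_true hp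
        have hrl : rest.length ≤ n := by simp only [List.length_cons] at hl; omega
        rw [pvGoChar _ _ _ _ _ _ hp]
        rw [ih _ hrl f (c :: cur) _ (by simp only [List.length_cons] at hf ⊢; omega)]
        have hsplit : PySem.Chars.splitOn (c :: rest) sep
            = (PySem.Chars.splitOn rest sep).modifyHead (fun x => c :: x) := by
          rw [pvSplitOnDef (c :: rest), List.length_cons, pvGoChar _ _ _ _ _ _ hp]
          rw [ih _ hrl _ [c] _ (by omega), pvSplitOnDef rest]
          simp
        rw [hsplit, List.modifyHead_modifyHead]
        have hfun : (fun x => (c :: cur).reverse ++ x) = ((fun x : List Char => cur.reverse ++ x) ∘ fun x => c :: x) := by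
          funext x
          simp
        rw [hfun]

-- splitOn: structural recursion equations
theorem pvSplitPref (sep : List Char) (hsep : sep ≠ []) (c : Char) (rest : List Char)
    (h : sep.isPrefixOf (c :: rest) = true) :
    PySem.Chars.splitOn (c :: rest) sep
      = [] :: PySem.Chars.splitOn ((c :: rest).drop sep.length) sep := by
  have hkpos : 0 < sep.length := List.length_pos_iff.mpr hsep
  rw [pvSplitOnDef (c :: rest), List.length_cons, pvGoPref _ _ _ _ _ _ h]
  rw [pvGoEq sep hsep ((c :: rest).drop sep.length).length _ le_rfl _ [] _
    (by simp only [List.length_drop, List.length_cons]; omega)]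
  simp
  generalize PySem.Chars.splitOn (List.drop sep.length (c :: rest)) sep = t
  cases t <;> simp

theorem pvSplitChar (sep : List Char) (hsep : sep ≠ []) (c : Char) (rest : List Char)
    (h : sep.isPrefixOf (c :: rest) = false) :
    PySem.Chars.splitOn (c :: rest) sep
      = (PySem.Chars.splitOn rest sep).modifyHead (fun x => c :: x) := by
  rw [pvSplitOnDef (c :: rest), List.length_cons, pvGoChar _ _ _ _ _ _ h]
  rw [pvGoEq sep hsep rest.length _ le_rfl _ [c] _ (by omega), pvSplitOnDef rest]
  simp

theorem pvSplitNeNil (sep : List Char) (hsep : sep ≠ []) :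
    ∀ (n : Nat) (s : List Char), s.length ≤ n → PySem.Chars.splitOn s sep ≠ [] := by
  intro n
  induction n with
  | zero =>
    intro s hs
    obtain rfl : s = [] := List.length_eq_zero_iff.mp (by omega)
    simp [pvSplitNil]
  | succ n ih =>
    intro s hs
    match s with
    | [] => simp [pvSplitNil]
    | c :: rest =>
      by_cases hp : sep.isPrefixOf (c :: rest) = true
      · rw [pvSplitPref sep hsep c rest hp]
        simp
      · replace hp : sep.isPrefixOf (c :: rest) = false := Bool.not_eq_true _ ▸ eq_false_of_ne_true hp
        rw [pvSplitChar sep hsep c rest hp]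
        have := ih rest (by simp only [List.length_cons] at hs; omega)
        generalize hsp : PySem.Chars.splitOn rest sep = t at this
        cases t <;> simp_all

theorem pvHeadPrefix (sep : List Char) (hsep : sep ≠ []) :
    ∀ (n : Nat) (s : List Char), s.length ≤ n → (PySem.Chars.splitOn s sep).headD [] <+: s := by
  intro n
  induction n with
  | zero =>
    intro s hs
    obtain rfl : s = [] := List.length_eq_zero_iff.mp (by omega)
    simp [pvSplitNil]
  | succ n ih =>
    intro s hs
    match s with
    | [] => simp [pvSplitNil]
    | c :: rest =>
      by_cases hp : sep.isPrefixOf (c :: rest) = true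
      · rw [pvSplitPref sep hsep c rest hp]
        simp
      · replace hp : sep.isPrefixOf (c :: rest) = false := Bool.not_eq_true _ ▸ eq_false_of_ne_true hp
        rw [pvSplitChar sep hsep c rest hp]
        have h1 := ih rest (by simp only [List.length_cons] at hs; omega)
        have h2 := pvSplitNeNil sep hsep rest.length rest le_rfl
        generalize hsp : PySem.Chars.splitOn rest sep = t at h1 h2
        cases t with
        | nil => simp_all
        | cons a b =>
          simp only [List.modifyHead, List.headD_cons] at h1 ⊢
          exact List.cons_prefix_cons.mpr ⟨rfl, h1⟩

-- pvParseGo: one-step unfolding equations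
theorem pvPGNil (mode : Nat) (cur : List Char) (out : List (List Char)) :
    pvParseGo [] mode cur out = if mode == 1 then out else out ++ [cur] := by
  rw [pvParseGo]

theorem pvPGDont (c : Char) (rest cur : List Char) (mode : Nat) (out : List (List Char))
    (h : List.isPrefixOf "don't()".toList (c :: rest) = true) :
    pvParseGo (c :: rest) mode cur out
      = pvParseGo ((c :: rest).drop 7) 1 [] (if mode == 1 then out else out ++ [cur]) := by
  rw [pvParseGo]
  simp at h
  simp [h]
  exact fun hc => absurd h.1 hc

theorem pvPGDo (c : Char) (rest cur : List Char) (mode : Nat) (out : List (List Char))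
    (h1 : List.isPrefixOf "don't()".toList (c :: rest) = false)
    (h2 : List.isPrefixOf "do()".toList (c :: rest) = true) (h3 : mode ≠ 0) :
    pvParseGo (c :: rest) mode cur out
      = pvParseGo ((c :: rest).drop 4) 2 [] (if mode == 2 then out ++ [cur] else out) := by
  rw [pvParseGo]
  simp at h2
  obtain ⟨hd, ho⟩ := h2
  subst hd
  simp at h1
  simp [h1, ho, h3]

theorem pvPGChar (c : Char) (rest cur : List Char) (mode : Nat) (out : List (List Char))
    (h1 : List.isPrefixOf "don't()".toList (c :: rest) = false)
    (h2 : mode = 0 ∨ List.isPrefixOf "do()".toList (c :: rest) = false) :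
    pvParseGo (c :: rest) mode cur out
      = pvParseGo rest mode (if mode == 1 then cur else cur ++ [c]) out := by
  rw [pvParseGo]
  simp at h1
  rcases h2 with h2 | h2
  · simp [h1, h2]
  · simp at h2
    simp [h1, h2]

theorem pvDLlit : "don't()".toList = ['d','o','n','\'','t','(',')'] := by simp
theorem pvOLlit : "do()".toList = ['d','o','(',')'] := by simp

-- The main invariant: the state machine, in each of its three modes, computes the
-- corresponding nested-split shape of A.
theorem pvMain : ∀ (n : Nat) (s : List Char), s.length ≤ n →
    (∀ cur out, pvParseGo s 0 cur out = out ++ (pvResA s).modifyHead (fun x => cur ++ x))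
    ∧ (∀ cur out, pvParseGo s 1 cur out = out ++ pvOffA s)
    ∧ (∀ cur out, pvParseGo s 2 cur out = out ++ (pvOnA s).modifyHead (fun x => cur ++ x)) := by
  have hD7 : ("don't()".toList : List Char) ≠ [] := by decide
  have hO4 : ("do()".toList : List Char) ≠ [] := by decide
  intro n
  induction n with
  | zero =>
    intro s hs
    obtain rfl : s = [] := List.length_eq_zero_iff.mp (by omega)
    refine ⟨?_, ?_, ?_⟩ <;> intro cur out <;>
      simp [pvPGNil, pvResA, pvOffA, pvOnA, pvTailF, pvG, pvSplitNil]
  | succ n ih =>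
    intro s hs
    match s with
    | [] =>
      refine ⟨?_, ?_, ?_⟩ <;> intro cur out <;>
        simp [pvPGNil, pvResA, pvOffA, pvOnA, pvTailF, pvG, pvSplitNil]
    | c :: rest =>
      have hlr : rest.length ≤ n := by simp only [List.length_cons] at hs; omega
      by_cases hD : List.isPrefixOf "don't()".toList (c :: rest) = true
      · -- "don't()" is a prefix here
        obtain ⟨t, ht⟩ := List.isPrefixOf_iff_prefix.mp hD
        have hdlen : ("don't()".toList : List Char).length = 7 := by decide
        have hdrop : (c :: rest).drop 7 = t := by
          rw [← ht, ← hdlen, List.drop_left]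
        have hlt : t.length ≤ n := by
          have := congrArg List.length ht
          simp at this
          omega
        have hsplit : PySem.Chars.splitOn (c :: rest) "don't()".toList
            = [] :: PySem.Chars.splitOn t "don't()".toList := by
          rw [pvSplitPref _ hD7 c rest hD, hdlen, hdrop]
        simp only [pvDLlit] at hsplit
        refine ⟨?_, ?_, ?_⟩ <;> intro cur out
        · rw [pvPGDont c rest cur 0 out hD, hdrop]
          rw [(ih t hlt).2.1]
          simp [pvResA, pvTailF, pvOffA, hsplit]
        · rw [pvPGDont c rest cur 1 out hD, hdrop]
          rw [(ih t hlt).2.1]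
          simp [pvOffA, pvG, hsplit, pvSplitNil]
        · rw [pvPGDont c rest cur 2 out hD, hdrop]
          rw [(ih t hlt).2.1]
          simp [pvOnA, pvTailF, pvOffA, hsplit, pvSplitNil]
      · replace hD : List.isPrefixOf "don't()".toList (c :: rest) = false :=
          Bool.not_eq_true _ ▸ eq_false_of_ne_true hD
        -- the mode-0 scan never tests "do()"; one character is consumed
        obtain ⟨c0r, restr, hcrR⟩ :=
          List.exists_cons_of_ne_nil (pvSplitNeNil _ hD7 rest.length rest le_rfl)
        have hsplitC : PySem.Chars.splitOn (c :: rest) "don't()".toList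
            = (c :: c0r) :: restr := by
          rw [pvSplitChar _ hD7 c rest hD, hcrR]
          rfl
        simp only [pvDLlit] at hsplitC hcrR
        have hP0 : ∀ cur out, pvParseGo (c :: rest) 0 cur out
            = out ++ (pvResA (c :: rest)).modifyHead (fun x => cur ++ x) := by
          intro cur out
          rw [pvPGChar c rest cur 0 out hD (Or.inl rfl)]
          rw [(ih rest hlr).1]
          simp [pvResA, pvTailF, hsplitC, hcrR]
        by_cases hO : List.isPrefixOf "do()".toList (c :: rest) = true
        · -- "do()" is a prefix (and "don't()" is not)
          obtain ⟨t4, ht4⟩ := List.isPrefixOf_iff_prefix.mp hO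
          have c_eq : c = 'd' ∧ rest = 'o' :: '(' :: ')' :: t4 := by
            have : ('d' : Char) :: 'o' :: '(' :: ')' :: t4 = c :: rest := ht4
            cases this
            exact ⟨rfl, rfl⟩
          obtain ⟨rfl, rfl⟩ := c_eq
          have hlt4 : t4.length ≤ n := by simp at hs; omega
          obtain ⟨c0, restr4, hcr4⟩ :=
            List.exists_cons_of_ne_nil (pvSplitNeNil _ hD7 t4.length t4 le_rfl)
          -- "don't()" cannot start inside the "do()" marker: peel four characters
          have hsplit4 : PySem.Chars.splitOn ('d' :: 'o' :: '(' :: ')' :: t4) "don't()".toList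
              = ('d' :: 'o' :: '(' :: ')' :: c0) :: restr4 := by
            rw [pvSplitChar _ hD7 _ _ hD,
                pvSplitChar _ hD7 _ _ (by simp [List.isPrefixOf]),
                pvSplitChar _ hD7 _ _ (by simp [List.isPrefixOf]),
                pvSplitChar _ hD7 _ _ (by simp [List.isPrefixOf]),
                hcr4]
            rfl
          simp only [pvDLlit] at hsplit4 hcr4
          have hsplitO : PySem.Chars.splitOn ('d' :: 'o' :: '(' :: ')' :: c0) "do()".toList
              = [] :: PySem.Chars.splitOn c0 "do()".toList := by
            rw [pvSplitPref _ hO4 _ _ (by simp [List.isPrefixOf])]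
            rfl
          obtain ⟨e0, es, he⟩ :=
            List.exists_cons_of_ne_nil (pvSplitNeNil _ hO4 c0.length c0 le_rfl)
          simp only [pvOLlit] at hsplitO he
          refine ⟨hP0, ?_, ?_⟩ <;> intro cur out
          · rw [pvPGDo _ _ cur 1 out hD hO (by omega)]
            show pvParseGo t4 2 [] out = _
            rw [(ih t4 hlt4).2.2]
            simp [pvOffA, pvOnA, pvTailF, pvG, hsplit4, hcr4, hsplitO, he]
          · rw [pvPGDo _ _ cur 2 out hD hO (by omega)]
            show pvParseGo t4 2 [] (out ++ [cur]) = _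
            rw [(ih t4 hlt4).2.2]
            simp [pvOnA, pvTailF, hsplit4, hcr4, hsplitO, he]
        · replace hO : List.isPrefixOf "do()".toList (c :: rest) = false :=
            Bool.not_eq_true _ ▸ eq_false_of_ne_true hO
          -- plain character in all three modes
          have hOc : List.isPrefixOf "do()".toList (c :: c0r) = false := by
            rw [← Bool.not_eq_true, List.isPrefixOf_iff_prefix]
            intro hpre
            have h1 : c0r <+: rest := by
              have := pvHeadPrefix _ hD7 rest.length rest le_rfl
              rw [pvDLlit] at this
              rwa [hcrR, List.headD_cons] at this
            have : "do()".toList <+: c :: rest :=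
              hpre.trans (List.cons_prefix_cons.mpr ⟨rfl, h1⟩)
            rw [← List.isPrefixOf_iff_prefix, hO] at this
            exact Bool.false_ne_true this
          obtain ⟨e0, es, he⟩ :=
            List.exists_cons_of_ne_nil (pvSplitNeNil _ hO4 c0r.length c0r le_rfl)
          have hsplitOc : PySem.Chars.splitOn (c :: c0r) "do()".toList
              = (c :: e0) :: es := by
            rw [pvSplitChar _ hO4 _ _ hOc, he]
            rfl
          simp only [pvOLlit] at hsplitOc he
          refine ⟨hP0, ?_, ?_⟩ <;> intro cur out
          · rw [pvPGChar c rest cur 1 out hD (Or.inr hO)]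
            show pvParseGo rest 1 cur out = _
            rw [(ih rest hlr).2.1]
            simp [pvOffA, pvG, hsplitC, hcrR, hsplitOc, he]
          · rw [pvPGChar c rest cur 2 out hD (Or.inr hO)]
            show pvParseGo rest 2 (cur ++ [c]) out = _
            rw [(ih rest hlr).2.2]
            simp [pvOnA, pvTailF, hsplitC, hcrR, hsplitOc, he]

theorem parse_enabled_eq (text : String) : parse_enabled text = parse_enabled_alt text := by
  obtain ⟨c0, restr, hcr⟩ := List.exists_cons_of_ne_nil
    (pvSplitNeNil _ (by decide : ("don't()".toList : List Char) ≠ [])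
      text.toList.length text.toList le_rfl)
  have hB : pvParseGo text.toList 0 [] [] = pvResA text.toList := by
    rw [(pvMain text.toList.length text.toList le_rfl).1]
    simp [pvResA]
  unfold parse_enabled parse_enabled_alt
  rw [pvDLlit] at hcr
  rw [hB]
  simp [PySem.List.slice_from, pvResA, pvTailF, hcr, List.flatMap]
  refine congrArg List.flatten (List.map_congr_left ?_)
  intro x _
  simp [pvG, List.drop_one]

-- ===== VERDICT (by name: the statement is the Claim_ definition above) =====
theorem parse_enabled_spec : Claim_equal_parse_enabled := by
  intro text _hdom
  unfold Spec_parse_enabled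
  exact parse_enabled_eq text
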